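-- pv_equiv track=rewrite | github.com/Buscedv/Ask | ask_lang/transpiler/lexer.py | merge_ops
-- ===== SOURCE A (Python) =====
-- from typing import List
--
-- def merge_ops(tokens: List[List[str]]) -> List[List[str]]:
-- 	result = []
-- 	tmp = []
--
-- 	for token in tokens:
-- 		if token[0] == 'OP' and token[1] in ['=', ':', '-', '+', '*', '/', '%', '&', '|', '<', '>', '^', '!']:
-- 			tmp.append(token[1])
-- 		else:
-- 			if tmp:
-- 				result.append(['OP', ''.join(tmp)])
-- 				tmp = []
--
-- 			result.append(token)
--
-- 	# Last match
-- 	if tmp: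
-- 		result.append(['OP', ''.join(tmp)])
--
-- 	return result
-- ===== SOURCE B (Python) =====
-- OPS = set('=:-+*/%&|<>^!')
--
--
-- def _mergeable(t):
--     return t[0] == 'OP' and t[1] in OPS
--
--
-- def merge_ops(tokens):
--     result = []
--     i = 0
--     n = len(tokens)
--     while i < n:
--         if _mergeable(tokens[i]):
--             j = i
--             while j < n and _mergeable(tokens[j]):
--                 j += 1
--             result.append(['OP', ''.join(t[1] for t in tokens[i:j])])
--             i = j
--         else:
--             result.append(tokens[i])
--             i += 1
--     return result
-- ===== Notes on version B (the rewrite author's own statement) =====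
-- stated objective: alternative
-- what changed: B scans maximal runs of mergeable OP tokens with a two-index run scanner and emits one merged token per run, instead of A's single pass with a tmp accumulator and a trailing flush special case.
-- outside the precondition, e.g. on merge_ops([[]]): A raises IndexError, B raises IndexError; on merge_ops([['OP']]): A raises IndexError, B raises IndexError
import Mathlib
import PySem

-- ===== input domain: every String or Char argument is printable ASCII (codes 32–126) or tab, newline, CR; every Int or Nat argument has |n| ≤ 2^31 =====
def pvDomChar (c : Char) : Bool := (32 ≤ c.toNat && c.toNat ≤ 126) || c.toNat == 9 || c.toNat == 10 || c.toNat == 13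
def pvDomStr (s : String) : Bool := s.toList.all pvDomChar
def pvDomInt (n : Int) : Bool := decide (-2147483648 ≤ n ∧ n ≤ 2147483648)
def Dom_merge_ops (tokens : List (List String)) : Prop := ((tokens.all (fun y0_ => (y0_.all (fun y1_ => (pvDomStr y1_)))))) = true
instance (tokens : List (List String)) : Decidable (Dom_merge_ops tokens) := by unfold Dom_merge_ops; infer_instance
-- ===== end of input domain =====

-- B scans maximal runs of mergeable OP tokens and emits one merged token per run,
-- instead of A's tmp accumulator with a trailing flush; alternative decomposition, same cost.

-- ===== PORT A =====
-- the 13 operator characters (as 1-char strings: Python's `in set('=:-+*/%&|<>^!')`)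
def pvOpChars : List String := ["=", ":", "-", "+", "*", "/", "%", "&", "|", "<", ">", "^", "!"]

-- token[0] == 'OP' and token[1] in [...] — short-circuit; out-of-range index only outside Pre_
def pvMergeable (t : List String) : Bool :=
  ((PySem.List.pyGet? t 0).getD "" == "OP") && pvOpChars.contains ((PySem.List.pyGet? t 1).getD "")

def pvGet1 (t : List String) : String := (PySem.List.pyGet? t 1).getD ""

-- the loop body: state (result, tmp)
def pvStepA (st : List (List String) × List String) (token : List String) :
    List (List String) × List String :=
  if pvMergeable token then (st.1, st.2 ++ [pvGet1 token])
  else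
    (((if st.2 ≠ [] then st.1 ++ [["OP", PySem.Str.join "" st.2]] else st.1) ++ [token]), [])

def merge_ops (tokens : List (List String)) : List (List String) :=
  let st := tokens.foldl pvStepA ([], [])
  if st.2 ≠ [] then st.1 ++ [["OP", PySem.Str.join "" st.2]] else st.1

-- ===== PORT B =====
-- run scanner: leading mergeable run = takeWhile (the inner `while j < n` loop / slice)
def merge_ops_alt (tokens : List (List String)) : List (List String) :=
  match tokens with
  | [] => []
  | t :: rest =>
    if pvMergeable t then
      ["OP", PySem.Str.join "" ((t :: rest.takeWhile pvMergeable).map pvGet1)]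
        :: merge_ops_alt (rest.dropWhile pvMergeable)
    else t :: merge_ops_alt rest
termination_by tokens.length
decreasing_by
  · simpa using Nat.lt_succ_of_le (List.length_dropWhile_le pvMergeable rest)
  · simp

-- ===== PRECONDITION & SPEC =====
-- Pre_ excludes exactly the inputs where A raises IndexError: an empty token, or a
-- token whose first element is 'OP' but which has no second element.
def Pre_merge_ops (tokens : List (List String)) : Prop :=
  ∀ t ∈ tokens, t ≠ [] ∧ (t.headD "" = "OP" → 2 ≤ t.length)
instance (tokens : List (List String)) : Decidable (Pre_merge_ops tokens) := by
  unfold Pre_merge_ops; infer_instance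
def pvWitness_merge_ops : List (List String) :=
  [["ID", "x"], ["OP", "+"], ["OP", "="], ["NUM", "1"]]

def Spec_merge_ops (tokens : List (List String)) (out : List (List String)) : Prop := out = merge_ops_alt tokens
instance (tokens : List (List String)) (out : List (List String)) : Decidable (Spec_merge_ops tokens out) := by unfold Spec_merge_ops; infer_instance

-- ===== CLAIM (what is proved, stated in full; the proofs are below) =====
def Claim_equal_merge_ops : Prop := ∀ (tokens : List (List String)), Dom_merge_ops tokens → Pre_merge_ops tokens → Spec_merge_ops tokens (merge_ops tokens)

-- ===== LEMMAS AND PROOFS =====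

lemma pvAlt_cons_pos (t : List String) (rest : List (List String)) (hm : pvMergeable t = true) :
    merge_ops_alt (t :: rest) =
      ["OP", PySem.Str.join "" ((t :: rest.takeWhile pvMergeable).map pvGet1)]
        :: merge_ops_alt (rest.dropWhile pvMergeable) := by
  conv_lhs => rw [merge_ops_alt.eq_def]
  simp [hm]

lemma pvAlt_cons_neg (t : List String) (rest : List (List String)) (hm : ¬ pvMergeable t = true) :
    merge_ops_alt (t :: rest) = t :: merge_ops_alt rest := by
  conv_lhs => rw [merge_ops_alt.eq_def]
  simp [hm]

-- A's pending run, abstracted: process tokens with accumulated operator chars tmp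
def pvPend (tmp : List String) (tokens : List (List String)) : List (List String) :=
  match tokens with
  | [] => if tmp ≠ [] then [["OP", PySem.Str.join "" tmp]] else []
  | t :: rest =>
    if pvMergeable t then pvPend (tmp ++ [pvGet1 t]) rest
    else (if tmp ≠ [] then [["OP", PySem.Str.join "" tmp]] else []) ++ t :: merge_ops_alt rest

lemma pvPend_eq (tokens : List (List String)) : ∀ tmp,
    pvPend tmp tokens =
      if tmp = [] then merge_ops_alt tokens
      else ["OP", PySem.Str.join "" (tmp ++ (tokens.takeWhile pvMergeable).map pvGet1)]
        :: merge_ops_alt (tokens.dropWhile pvMergeable) := by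
  induction tokens with
  | nil =>
    intro tmp
    by_cases h : tmp = [] <;> simp [pvPend, merge_ops_alt, h]
  | cons t rest ih =>
    intro tmp
    by_cases hm : pvMergeable t
    · rw [pvPend, if_pos hm, ih]
      have hne : tmp ++ [pvGet1 t] ≠ [] := by simp
      rw [if_neg hne]
      by_cases h : tmp = []
      · subst h
        rw [if_pos rfl, pvAlt_cons_pos t rest hm]
        simp [hm]
      · rw [if_neg h]
        simp [hm]
    · rw [pvPend, if_neg hm]
      by_cases h : tmp = []
      · subst h
        rw [pvAlt_cons_neg t rest hm]
        simp
      · rw [if_neg h, if_pos h]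
        simp [hm, pvAlt_cons_neg t rest hm]

lemma pvFold_eq (tokens : List (List String)) : ∀ result tmp,
    (let st := tokens.foldl pvStepA (result, tmp)
     if st.2 ≠ [] then st.1 ++ [["OP", PySem.Str.join "" st.2]] else st.1)
      = result ++ pvPend tmp tokens := by
  induction tokens with
  | nil => intro result tmp; simp only [List.foldl_nil, pvPend]; split_ifs <;> simp
  | cons t rest ih =>
    intro result tmp
    by_cases hm : pvMergeable t
    · simp only [List.foldl_cons, pvStepA, if_pos hm]
      rw [ih, pvPend, if_pos hm]
    · simp only [List.foldl_cons, pvStepA, if_neg hm]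
      rw [ih, pvPend_eq rest [], if_pos rfl, pvPend, if_neg hm]
      by_cases h : tmp = [] <;> simp [h]

-- ===== VERDICT (by name: the statement is the Claim_ definition above) =====
theorem merge_ops_spec : Claim_equal_merge_ops := by
  intro tokens _ _
  unfold Spec_merge_ops merge_ops
  rw [pvFold_eq, pvPend_eq]
  simp
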